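-- pv_equiv track=rewrite | github.com/Recla1mer/EDF_Processing | check_data.py | ecg_validation_txt_string_evaluation
-- ===== SOURCE A (Python) =====
-- def ecg_validation_txt_string_evaluation(string: str):
--     """
--     Appearence of string entries in the .txt files: "integer integer"
--     The first integer is the index in the ECG data and the second integer is the classification:
--     (0: valid, 1: invalid)
--
--     ARGUMENTS:
--     --------------------------------
--     string: str
--         string to be evaluated
--
--     RETURNS:
--     --------------------------------
--     datapoint: int
--         index of the data point
--     classification: str
--         classification of the data point
--     """
--
--     # set default values if the integer or the letter do not exist
--     datapoint = " "
--     classification = " "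
--
--     was_number = False
--     for i in range(len(string)):
--         if string[i].isdigit():
--             if datapoint != " ":
--                 classification = string[i]
--                 break
--             if not was_number:
--                 start = i
--             was_number = True
--         else:
--             if was_number:
--                 datapoint = int(string[start:i])
--             was_number = False
--
--     return datapoint, classification
-- ===== SOURCE B (Python) =====
-- def ecg_validation_txt_string_evaluation(string: str):
--     # Three successive index searches instead of a per-character state machine.
--     n = len(string)
--     datapoint = " "
--     classification = " "
--     i = next((k for k in range(n) if string[k].isdigit()), None)
--     if i is not None:
--         j = next((k for k in range(i + 1, n) if not string[k].isdigit()), None)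
--         if j is not None:
--             datapoint = int(string[i:j])
--             k = next((m for m in range(j + 1, n) if string[m].isdigit()), None)
--             if k is not None:
--                 classification = string[k]
--     return datapoint, classification
-- ===== Notes on version B (the rewrite author's own statement) =====
-- stated objective: simpler
-- what changed: Replaces A's single-pass boolean state machine (was_number/start/break flags) by three successive index searches: first digit, first non-digit after it, first digit after that.
-- outside the precondition, e.g. on ecg_validation_txt_string_evaluation('abc'): A returns (' ', ' '), B returns (' ', ' '); on ecg_validation_txt_string_evaluation('12'): A returns (' ', ' '), B returns (' ', ' ')
import Mathlib
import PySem

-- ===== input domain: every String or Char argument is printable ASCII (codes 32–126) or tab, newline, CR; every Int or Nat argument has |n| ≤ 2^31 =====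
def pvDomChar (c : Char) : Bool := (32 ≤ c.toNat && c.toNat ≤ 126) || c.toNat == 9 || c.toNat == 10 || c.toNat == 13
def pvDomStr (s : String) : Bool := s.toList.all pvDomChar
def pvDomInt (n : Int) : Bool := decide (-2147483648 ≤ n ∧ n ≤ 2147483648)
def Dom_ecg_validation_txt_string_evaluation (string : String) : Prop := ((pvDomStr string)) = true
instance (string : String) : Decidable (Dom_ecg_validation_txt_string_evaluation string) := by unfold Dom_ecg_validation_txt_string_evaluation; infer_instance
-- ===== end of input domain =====

-- B replaces A's single-pass boolean state machine by three successive index searches (simpler);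
-- Pre_ excludes inputs where Python A's datapoint stays the string " " (not an Int), see below.

-- ===== PORT A =====
-- A's datapoint is " " until the first digit run is terminated; we model it as Option Int
-- (none = " "); outside Pre_ the " " result is rendered as 0 (those inputs are excluded).
-- int(string[start:i]) on a digit run never fails, so .getD 0 is exact there.
def ecgA_loop (s : List Char) (i : Nat) (dp : Option Int) (cl : String)
    (wn : Bool) (st : Nat) : Option Int × String :=
  if h : i < s.length then
    if PySem.Chars.isdigit s[i] then
      match dp with
      | some _ => (dp, String.ofList [s[i]])    -- classification = string[i]; break
      | none =>
        let st' := if !wn then i else st    -- if not was_number: start = i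
        ecgA_loop s (i+1) dp cl true st'
    else
      if wn then
        ecgA_loop s (i+1)
          (some ((PySem.Int.ofChars? ((s.drop st).take (i - st))).getD 0))  -- int(string[start:i])
          cl false st
      else ecgA_loop s (i+1) dp cl false st
  else (dp, cl)
termination_by s.length - i

def ecg_validation_txt_string_evaluation (string : String) : Int × String :=
  let r := ecgA_loop string.toList 0 none " " false 0
  (r.1.getD 0, r.2)

-- ===== PORT B =====
-- first index k with i ≤ k < s.length and p s[k]  (port of next((k for k in range(i,n) if p), None))
def ecgB_scan (s : List Char) (p : Char → Bool) (i : Nat) : Option Nat :=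
  if h : i < s.length then
    if p s[i] then some i else ecgB_scan s p (i+1)
  else none
termination_by s.length - i

def ecg_validation_txt_string_evaluation_alt (string : String) : Int × String :=
  let s := string.toList
  match ecgB_scan s (fun c => PySem.Chars.isdigit c) 0 with
  | none => (0, " ")
  | some i =>
    match ecgB_scan s (fun c => !PySem.Chars.isdigit c) (i+1) with
    | none => (0, " ")
    | some j =>
      let dp := (PySem.Int.ofChars? ((s.drop i).take (j - i))).getD 0  -- int(string[i:j])
      match ecgB_scan s (fun c => PySem.Chars.isdigit c) (j+1) with
      | none => (dp, " ")
      | some k => (dp, String.ofList [s.getD k ' '])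

-- ===== PRECONDITION & SPEC =====
-- Pre_ excludes exactly the inputs on which Python A returns the string " " as datapoint
-- (no digit, or the first digit run reaches the end of the string): there A's result is not
-- of the declared type Int × String.  On such inputs both Pythons still agree (both return
-- (' ', ' ')); only the Int rendering forces the exclusion.
def Pre_ecg_validation_txt_string_evaluation (string : String) : Prop :=
  ∃ i < string.toList.length, PySem.Chars.isdigit (string.toList.getD i ' ') = true ∧
    ∃ j < string.toList.length, i < j ∧ PySem.Chars.isdigit (string.toList.getD j ' ') = false
instance (string : String) : Decidable (Pre_ecg_validation_txt_string_evaluation string) := by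
  unfold Pre_ecg_validation_txt_string_evaluation; infer_instance

def pvWitness_ecg_validation_txt_string_evaluation : String := "12 0"

def Spec_ecg_validation_txt_string_evaluation (string : String) (out : Int × String) : Prop := out = ecg_validation_txt_string_evaluation_alt string
instance (string : String) (out : Int × String) : Decidable (Spec_ecg_validation_txt_string_evaluation string out) := by unfold Spec_ecg_validation_txt_string_evaluation; infer_instance

-- ===== CLAIM (what is proved, stated in full; the proofs are below) =====
def Claim_equal_ecg_validation_txt_string_evaluation : Prop := ∀ (string : String), Dom_ecg_validation_txt_string_evaluation string → Pre_ecg_validation_txt_string_evaluation string → Spec_ecg_validation_txt_string_evaluation string (ecg_validation_txt_string_evaluation string)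

-- ===== LEMMAS AND PROOFS =====

-- Phase 3: datapoint already set, was_number = False: scan for the next digit, break on it.
theorem ecgA_loop_phase3 (s : List Char) (i : Nat) (v : Int) (cl : String) (st : Nat) :
    ecgA_loop s i (some v) cl false st =
      match ecgB_scan s (fun c => PySem.Chars.isdigit c) i with
      | some k => (some v, String.ofList [s.getD k ' '])
      | none => (some v, cl) := by
  fun_induction ecgB_scan s (fun c => PySem.Chars.isdigit c) i with
  | case1 i h hp => rw [ecgA_loop]; simp_all [List.getD]
  | case2 i h hp ih => rw [ecgA_loop]; simp_all
  | case3 i h => rw [ecgA_loop]; simp_all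

-- Phase 2: inside the first digit run (was_number = True, start = st): scan for the first
-- non-digit j; there datapoint := int(string[st:j]) and phase 3 starts at j+1.
theorem ecgA_loop_phase2 (s : List Char) (i : Nat) (cl : String) (st : Nat) :
    ecgA_loop s i none cl true st =
      match ecgB_scan s (fun c => !PySem.Chars.isdigit c) i with
      | some j =>
          (some ((PySem.Int.ofChars? ((s.drop st).take (j - st))).getD 0),
            match ecgB_scan s (fun c => PySem.Chars.isdigit c) (j+1) with
            | some k => String.ofList [s.getD k ' ']
            | none => cl)
      | none => (none, cl) := by
  fun_induction ecgB_scan s (fun c => !PySem.Chars.isdigit c) i with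
  | case1 i h hp =>
      rw [ecgA_loop]
      simp only [Bool.not_eq_true'] at hp
      simp [h, hp, ecgA_loop_phase3]
      cases ecgB_scan s (fun c => PySem.Chars.isdigit c) (i+1) <;> rfl
  | case2 i h hp ih =>
      rw [ecgA_loop]
      have hp' : PySem.Chars.isdigit s[i] = true := by simpa using hp
      simp [h, hp', ih]
  | case3 i h => rw [ecgA_loop]; simp [h]

-- Phase 1: looking for the first digit (was_number = False, datapoint unset).
theorem ecgA_loop_phase1 (s : List Char) (i : Nat) (cl : String) (st : Nat) :
    ecgA_loop s i none cl false st =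
      match ecgB_scan s (fun c => PySem.Chars.isdigit c) i with
      | some i0 =>
          (match ecgB_scan s (fun c => !PySem.Chars.isdigit c) (i0+1) with
          | some j =>
              (some ((PySem.Int.ofChars? ((s.drop i0).take (j - i0))).getD 0),
                match ecgB_scan s (fun c => PySem.Chars.isdigit c) (j+1) with
                | some k => String.ofList [s.getD k ' ']
                | none => cl)
          | none => (none, cl))
      | none => (none, cl) := by
  fun_induction ecgB_scan s (fun c => PySem.Chars.isdigit c) i with
  | case1 i h hp => rw [ecgA_loop]; simp [h, hp, ecgA_loop_phase2]
  | case2 i h hp ih => rw [ecgA_loop]; simp_all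
  | case3 i h => rw [ecgA_loop]; simp_all

-- ===== VERDICT (by name: the statement is the Claim_ definition above) =====
theorem ecg_validation_txt_string_evaluation_spec : Claim_equal_ecg_validation_txt_string_evaluation := by
  intro string _ _
  unfold Spec_ecg_validation_txt_string_evaluation
  unfold ecg_validation_txt_string_evaluation ecg_validation_txt_string_evaluation_alt
  rw [ecgA_loop_phase1]
  cases h1 : ecgB_scan string.toList (fun c => PySem.Chars.isdigit c) 0 with
  | none => simp [h1]
  | some i0 =>
    cases h2 : ecgB_scan string.toList (fun c => !PySem.Chars.isdigit c) (i0+1) with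
    | none => simp [h1, h2]
    | some j =>
      cases h3 : ecgB_scan string.toList (fun c => PySem.Chars.isdigit c) (j+1) <;> simp [h1, h2, h3]
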